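-- pv_equiv track=rewrite | github.com/SissiFeng/NeverOT | app/agents/planner_agent.py | _infer_instruments
-- ===== SOURCE A (Python) =====
-- from typing import Any, Literal
--
-- def _infer_instruments(dimensions: list[dict[str, Any]]) -> list[str]:
--     """Infer which instruments are needed from dimension primitives."""
--     instruments = set()
--     for d in dimensions:
--         primitive = d.get("primitive", "")
--         if primitive.startswith("robot."):
--             instruments.add("ot2")
--         elif primitive.startswith("plc."):
--             instruments.add("plc")
--         elif primitive.startswith("relay."):
--             instruments.add("relay")
--         elif primitive.startswith("squidstat."):
--             instruments.add("squidstat")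
--         elif primitive == "heat":
--             instruments.add("furnace")
--     return sorted(instruments)
-- ===== SOURCE B (Python) =====
-- _TESTS = [
--     ("furnace",   lambda p: p == "heat"),
--     ("ot2",       lambda p: p.startswith("robot.")),
--     ("plc",       lambda p: p.startswith("plc.")),
--     ("relay",     lambda p: p.startswith("relay.")),
--     ("squidstat", lambda p: p.startswith("squidstat.")),
-- ]
--
-- def _infer_instruments(dimensions: list[dict[str, "Any"]]) -> list[str]:
--     """Infer which instruments are needed from dimension primitives."""
--     prims = [d.get("primitive", "") for d in dimensions]
--     return [inst for inst, test in _TESTS if any(test(p) for p in prims)]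
-- ===== Notes on version B (the rewrite author's own statement) =====
-- stated objective: alternative
-- what changed: Inverts the loop nesting: instead of scanning dimensions once while accumulating a set and sorting it, B iterates over a fixed table of instruments already in sorted order and emits each instrument whose trigger matches some primitive (an any() existence scan), so no set and no sort are needed; correct because the five triggers are pairwise mutually exclusive.
import Mathlib
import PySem

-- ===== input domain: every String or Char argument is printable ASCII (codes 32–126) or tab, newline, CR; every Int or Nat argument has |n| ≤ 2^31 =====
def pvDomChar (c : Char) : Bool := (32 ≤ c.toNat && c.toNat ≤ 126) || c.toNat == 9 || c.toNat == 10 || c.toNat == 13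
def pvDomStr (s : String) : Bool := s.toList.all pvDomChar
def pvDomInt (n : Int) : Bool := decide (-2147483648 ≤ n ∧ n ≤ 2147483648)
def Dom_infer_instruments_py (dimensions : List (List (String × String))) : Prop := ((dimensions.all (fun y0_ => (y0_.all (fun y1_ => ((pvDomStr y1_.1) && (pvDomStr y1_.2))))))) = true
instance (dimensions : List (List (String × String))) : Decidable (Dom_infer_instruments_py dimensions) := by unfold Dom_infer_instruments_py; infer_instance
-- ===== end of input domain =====

-- B inverts the loop nesting: it walks a fixed table of instruments (already in sorted order)
-- and emits each instrument some primitive triggers, so no set and no final sort are needed;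
-- objective: alternative algorithm, same cost.

-- ===== PORT A =====
def pvStepA (s : PySem.Set String) (d : List (String × String)) : PySem.Set String :=
  let primitive := (PySem.Dict.mk d).getD "primitive" ""
  if PySem.Str.startswith primitive "robot." then PySem.Set.add s "ot2"
  else if PySem.Str.startswith primitive "plc." then PySem.Set.add s "plc"
  else if PySem.Str.startswith primitive "relay." then PySem.Set.add s "relay"
  else if PySem.Str.startswith primitive "squidstat." then PySem.Set.add s "squidstat"
  else if primitive == "heat" then PySem.Set.add s "furnace"
  else s

def infer_instruments_py (dimensions : List (List (String × String))) : List String :=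
  PySem.List.sorted (dimensions.foldl pvStepA PySem.Set.empty) (fun x => x) false

-- ===== PORT B =====
def pvTests : List (String × (String → Bool)) :=
  [("furnace",   fun p => p == "heat"),
   ("ot2",       fun p => PySem.Str.startswith p "robot."),
   ("plc",       fun p => PySem.Str.startswith p "plc."),
   ("relay",     fun p => PySem.Str.startswith p "relay."),
   ("squidstat", fun p => PySem.Str.startswith p "squidstat.")]

def infer_instruments_py_alt (dimensions : List (List (String × String))) : List String :=
  let prims := dimensions.map (fun d => (PySem.Dict.mk d).getD "primitive" "")
  (pvTests.filter (fun t => prims.any t.2)).map Prod.fst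

-- ===== PRECONDITION & SPEC =====
def Spec_infer_instruments_py (dimensions : List (List (String × String))) (out : List String) : Prop := out = infer_instruments_py_alt dimensions
instance (dimensions : List (List (String × String))) (out : List String) : Decidable (Spec_infer_instruments_py dimensions out) := by unfold Spec_infer_instruments_py; infer_instance

-- ===== CLAIM (what is proved, stated in full; the proofs are below) =====
def Claim_equal_infer_instruments_py : Prop := ∀ (dimensions : List (List (String × String))), Dom_infer_instruments_py dimensions → Spec_infer_instruments_py dimensions (infer_instruments_py dimensions)

-- ===== LEMMAS AND PROOFS =====

-- the value A and B both read from a dimension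
def pvPrim (d : List (String × String)) : String := (PySem.Dict.mk d).getD "primitive" ""

-- two strings neither of which is a prefix of the other cannot both be prefixes of p
lemma pv_excl (p a b : String) (h : PySem.Str.startswith p a = true)
    (hab : (a.toList.isPrefixOf b.toList || b.toList.isPrefixOf a.toList) = false) :
    PySem.Str.startswith p b = false := by
  rw [PySem.Str.startswith_eq] at h ⊢
  show PySem.Chars.startswith p.toList b.toList = false
  unfold PySem.Chars.startswith at h ⊢
  simp only [Bool.or_eq_false_iff] at hab
  apply Bool.eq_false_iff.mpr
  intro hb
  have h1 := List.isPrefixOf_iff_prefix.mp h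
  have h2 := List.isPrefixOf_iff_prefix.mp hb
  rcases List.prefix_or_prefix_of_prefix h1 h2 with hp | hp
  · exact Bool.eq_false_iff.mp hab.1 (List.isPrefixOf_iff_prefix.mpr hp)
  · exact Bool.eq_false_iff.mp hab.2 (List.isPrefixOf_iff_prefix.mpr hp)

lemma pv_not_heat (p ns : String) (h : PySem.Str.startswith p ns = true)
    (hns : PySem.Str.startswith "heat" ns = false) : (p == "heat") = false := by
  apply Bool.eq_false_iff.mpr
  intro hb
  rw [eq_of_beq hb, hns] at h
  exact Bool.false_ne_true h

-- the condition under which B emits instrument x because of dimension d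
def pvHits (d : List (String × String)) (x : String) : Prop :=
  ∃ t ∈ pvTests, t.1 = x ∧ t.2 (pvPrim d) = true

set_option maxHeartbeats 1000000 in
-- one step of A adds exactly the instruments whose trigger matches this primitive
-- (at most one of the five triggers can fire, so A's elif chain and B's table agree)
lemma mem_stepA (s : PySem.Set String) (d : List (String × String)) (x : String) :
    x ∈ pvStepA s d ↔ x ∈ s ∨ pvHits d x := by
  unfold pvStepA pvHits
  rw [show (PySem.Dict.mk d).getD "primitive" "" = pvPrim d from rfl]
  by_cases h1 : PySem.Str.startswith (pvPrim d) "robot." = true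
  · have e2 := pv_excl (pvPrim d) "robot." "plc." h1 (by decide)
    have e3 := pv_excl (pvPrim d) "robot." "relay." h1 (by decide)
    have e4 := pv_excl (pvPrim d) "robot." "squidstat." h1 (by decide)
    have e5 := pv_not_heat (pvPrim d) "robot." h1 (by decide)
    simp only [h1, if_true, Bool.false_eq_true, if_false, PySem.Set.mem_add, pvTests,
      List.mem_cons, List.not_mem_nil, or_false, exists_eq_or_imp, exists_eq_left,
      e2, e3, e4, e5]
    tauto
  rw [Bool.not_eq_true] at h1
  by_cases h2 : PySem.Str.startswith (pvPrim d) "plc." = true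
  · have e3 := pv_excl (pvPrim d) "plc." "relay." h2 (by decide)
    have e4 := pv_excl (pvPrim d) "plc." "squidstat." h2 (by decide)
    have e5 := pv_not_heat (pvPrim d) "plc." h2 (by decide)
    simp only [h1, h2, if_true, Bool.false_eq_true, if_false, PySem.Set.mem_add, pvTests,
      List.mem_cons, List.not_mem_nil, or_false, exists_eq_or_imp, exists_eq_left, e3, e4, e5]
    tauto
  rw [Bool.not_eq_true] at h2
  by_cases h3 : PySem.Str.startswith (pvPrim d) "relay." = true
  · have e4 := pv_excl (pvPrim d) "relay." "squidstat." h3 (by decide)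
    have e5 := pv_not_heat (pvPrim d) "relay." h3 (by decide)
    simp only [h1, h2, h3, if_true, Bool.false_eq_true, if_false, PySem.Set.mem_add, pvTests,
      List.mem_cons, List.not_mem_nil, or_false, exists_eq_or_imp, exists_eq_left, e4, e5]
    tauto
  rw [Bool.not_eq_true] at h3
  by_cases h4 : PySem.Str.startswith (pvPrim d) "squidstat." = true
  · have e5 := pv_not_heat (pvPrim d) "squidstat." h4 (by decide)
    simp only [h1, h2, h3, h4, if_true, Bool.false_eq_true, if_false, PySem.Set.mem_add, pvTests,
      List.mem_cons, List.not_mem_nil, or_false, exists_eq_or_imp, exists_eq_left, e5]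
    tauto
  rw [Bool.not_eq_true] at h4
  by_cases h5 : (pvPrim d == "heat") = true
  · simp only [h1, h2, h3, h4, h5, if_true, Bool.false_eq_true, if_false, PySem.Set.mem_add,
      pvTests, List.mem_cons, List.not_mem_nil, or_false, exists_eq_or_imp, exists_eq_left]
    tauto
  rw [Bool.not_eq_true] at h5
  simp only [h1, h2, h3, h4, h5, Bool.false_eq_true, if_false, pvTests,
    List.mem_cons, List.not_mem_nil, or_false, exists_eq_or_imp, exists_eq_left]
  tauto

lemma mem_foldA (dims : List (List (String × String))) :
    ∀ (s : PySem.Set String) (x : String),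
      x ∈ dims.foldl pvStepA s ↔ x ∈ s ∨ ∃ d ∈ dims, pvHits d x := by
  induction dims with
  | nil => simp
  | cons d ds ih =>
    intro s x
    rw [List.foldl_cons, ih, mem_stepA]
    simp only [List.mem_cons]
    constructor
    · rintro ((hs | hh) | ⟨d', hd', hh⟩)
      · exact Or.inl hs
      · exact Or.inr ⟨d, Or.inl rfl, hh⟩
      · exact Or.inr ⟨d', Or.inr hd', hh⟩
    · rintro (hs | ⟨d', (rfl | hd'), hh⟩)
      · exact Or.inl (Or.inl hs)
      · exact Or.inl (Or.inr hh)
      · exact Or.inr ⟨d', hd', hh⟩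

lemma nodup_foldA (dims : List (List (String × String))) :
    ∀ (s : PySem.Set String), s.Nodup → (dims.foldl pvStepA s).Nodup := by
  induction dims with
  | nil => intro s hs; exact hs
  | cons d ds ih =>
    intro s hs
    rw [List.foldl_cons]
    apply ih
    unfold pvStepA
    dsimp only
    split_ifs <;> first | exact PySem.Set.nodup_add _ _ hs | exact hs

lemma mem_altB (dims : List (List (String × String))) (x : String) :
    x ∈ infer_instruments_py_alt dims ↔ ∃ d ∈ dims, pvHits d x := by
  unfold infer_instruments_py_alt pvHits
  simp only [List.mem_map, List.mem_filter, List.any_eq_true, List.mem_map]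
  constructor
  · rintro ⟨t, ⟨ht, p, ⟨d, hd, rfl⟩, hp⟩, rfl⟩
    exact ⟨d, hd, t, ht, rfl, hp⟩
  · rintro ⟨d, hd, t, ht, rfl, hp⟩
    exact ⟨t, ⟨ht, _, ⟨d, hd, rfl⟩, hp⟩, rfl⟩

lemma nodup_pairwise_altB (dims : List (List (String × String))) :
    (infer_instruments_py_alt dims).Nodup ∧
      (infer_instruments_py_alt dims).Pairwise (fun a b => a < b) := by
  have hsub : (infer_instruments_py_alt dims).Sublist (pvTests.map Prod.fst) := by
    unfold infer_instruments_py_alt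
    exact List.Sublist.map Prod.fst List.filter_sublist
  have hpair : (pvTests.map Prod.fst).Pairwise (fun a b => a < b) := by
    apply List.IsChain.pairwise
    · simp only [pvTests, List.map, List.isChain_cons_cons, List.isChain_singleton, and_true]
      exact ⟨String.lt_iff_toList_lt.mpr (by decide), String.lt_iff_toList_lt.mpr (by decide),
        String.lt_iff_toList_lt.mpr (by decide), String.lt_iff_toList_lt.mpr (by decide)⟩
  exact ⟨(hpair.imp fun h => ne_of_lt h).sublist hsub, hpair.sublist hsub⟩

-- ===== VERDICT (by name: the statement is the Claim_ definition above) =====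
theorem infer_instruments_py_spec : Claim_equal_infer_instruments_py := by
  intro dims _
  unfold Spec_infer_instruments_py infer_instruments_py
  have hperm : (infer_instruments_py_alt dims).Perm (dims.foldl pvStepA PySem.Set.empty) := by
    rw [List.perm_ext_iff_of_nodup (nodup_pairwise_altB dims).1
      (nodup_foldA dims PySem.Set.empty (by simp [PySem.Set.empty]))]
    intro x
    rw [mem_altB, mem_foldA]
    simp [PySem.Set.empty]
  exact PySem.List.sorted_eq_of_perm_of_pairwise_lt _ _ (fun x => x) hperm
    (nodup_pairwise_altB dims).2
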